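-- pv_equiv track=rewrite | github.com/kevinjacb/Tabulate | tabulate.py | top_bottom_borders
-- ===== SOURCE A (Python) =====
-- def top_bottom_borders(top,column_size,max_length = []):
--     table = ""
--     for j in range(column_size):
--         if top:
--                 if j == 0 :
--                     table += "┌"+"─"*(max_length[j]+2)
--
--                 elif j != 0 and j != column_size -1:
--                      table +="┬"+"─"*(max_length[j]+2)
--
--                 if j == column_size -1 and column_size != 1:
--                     table += "┬"+"─"*(max_length[j]+2)+ "┐\n"
--
--                 elif j == column_size -1 and column_size == 1:
--                     table += "┐\n"
--
--         else:
--                 if j == 0: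
--                     table += "\n"
--                     table += "└"+"─"*(max_length[j]+2)
--
--                 elif j != 0 and j != column_size -1:
--                     table +=  "┴"+"─"*(max_length[j]+2)
--
--                 if j == column_size - 1 and column_size != 1:
--                     table +="┴"+"─"*(max_length[j]+2)+ "┘"
--
--                 elif j == column_size -1 and column_size == 1:
--                     table += "┘"
--
--     return table
-- ===== SOURCE B (Python) =====
-- def top_bottom_borders(top, column_size, max_length=[]):
--     if column_size <= 0:
--         return ""
--     segs = ["─" * (max_length[j] + 2) for j in range(column_size)]
--     if top:
--         return "┌" + "┬".join(segs) + "┐\n"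
--     return "\n" + "└" + "┴".join(segs) + "┘"
-- ===== Notes on version B (the rewrite author's own statement) =====
-- stated objective: simpler
-- what changed: Replaces the per-position first/middle/last/single-column if-elif cascade inside the loop by building the per-column dash segments once and assembling the border with a single corner-prefix + join + corner-suffix.
import Mathlib
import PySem

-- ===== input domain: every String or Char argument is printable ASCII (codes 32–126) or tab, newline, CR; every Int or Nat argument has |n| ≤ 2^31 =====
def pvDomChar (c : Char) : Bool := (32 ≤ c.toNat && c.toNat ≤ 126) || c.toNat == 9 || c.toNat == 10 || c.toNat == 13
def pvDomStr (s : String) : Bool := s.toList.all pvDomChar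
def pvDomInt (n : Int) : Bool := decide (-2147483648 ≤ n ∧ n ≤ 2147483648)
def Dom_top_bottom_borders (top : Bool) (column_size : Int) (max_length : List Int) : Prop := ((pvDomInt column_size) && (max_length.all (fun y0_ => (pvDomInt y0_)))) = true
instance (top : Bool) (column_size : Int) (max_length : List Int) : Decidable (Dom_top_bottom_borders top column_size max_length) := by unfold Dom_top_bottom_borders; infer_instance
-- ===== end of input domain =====

-- B replaces A's first/middle/last/single-column branch cascade by building the dash
-- segments once and joining them between corner characters (objective: simpler).

-- ===== PORT A =====
-- "─"*(max_length[j]+2) (strings handled as List Char throughout)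
def pvDashA (n : Int) : List Char := PySem.List.pyRepeat ['─'] (n + 2)

-- one iteration of A's loop body (top branch and bottom branch, same branch order as the Python)
def pvStepA (top : Bool) (cs : Int) (ml : List Int) (table : List Char) (j : Int) : List Char :=
  if top then
    let table :=
      if j = 0 then table ++ ['┌'] ++ pvDashA (PySem.List.pyGetD ml j 0)
      else if j ≠ 0 ∧ j ≠ cs - 1 then table ++ ['┬'] ++ pvDashA (PySem.List.pyGetD ml j 0)
      else table
    if j = cs - 1 ∧ cs ≠ 1 then table ++ ['┬'] ++ pvDashA (PySem.List.pyGetD ml j 0) ++ ['┐', '\n']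
    else if j = cs - 1 ∧ cs = 1 then table ++ ['┐', '\n']
    else table
  else
    let table :=
      if j = 0 then table ++ ['\n'] ++ ['└'] ++ pvDashA (PySem.List.pyGetD ml j 0)
      else if j ≠ 0 ∧ j ≠ cs - 1 then table ++ ['┴'] ++ pvDashA (PySem.List.pyGetD ml j 0)
      else table
    if j = cs - 1 ∧ cs ≠ 1 then table ++ ['┴'] ++ pvDashA (PySem.List.pyGetD ml j 0) ++ ['┘']
    else if j = cs - 1 ∧ cs = 1 then table ++ ['┘']
    else table

def top_bottom_borders (top : Bool) (column_size : Int) (max_length : List Int) : String :=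
  String.ofList ((PySem.List.pyRange 0 column_size).foldl (pvStepA top column_size max_length) [])

-- ===== PORT B =====
-- the list comprehension ["─"*(max_length[j]+2) for j in range(column_size)]
def pvSegsB (cs : Int) (ml : List Int) : List (List Char) :=
  (PySem.List.pyRange 0 cs).map (fun j => PySem.List.pyRepeat ['─'] (PySem.List.pyGetD ml j 0 + 2))

def top_bottom_borders_alt (top : Bool) (column_size : Int) (max_length : List Int) : String :=
  if column_size ≤ 0 then ""
  else if top then
    String.ofList (['┌'] ++ PySem.Chars.join ['┬'] (pvSegsB column_size max_length) ++ ['┐', '\n'])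
  else
    String.ofList (['\n'] ++ ['└'] ++ PySem.Chars.join ['┴'] (pvSegsB column_size max_length) ++ ['┘'])

-- ===== PRECONDITION & SPEC =====
-- A indexes max_length[j] for every j in range(column_size): Pre_ excludes exactly the
-- inputs where that raises IndexError (a positive column_size exceeding len(max_length)).
def Pre_top_bottom_borders (top : Bool) (column_size : Int) (max_length : List Int) : Prop :=
  0 < column_size → column_size ≤ (max_length.length : Int)
instance (top : Bool) (column_size : Int) (max_length : List Int) : Decidable (Pre_top_bottom_borders top column_size max_length) := by unfold Pre_top_bottom_borders; infer_instance

def pvWitness_top_bottom_borders : Bool × Int × List Int := (true, 2, [1, 0])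

def Spec_top_bottom_borders (top : Bool) (column_size : Int) (max_length : List Int) (out : String) : Prop := out = top_bottom_borders_alt top column_size max_length
instance (top : Bool) (column_size : Int) (max_length : List Int) (out : String) : Decidable (Spec_top_bottom_borders top column_size max_length out) := by unfold Spec_top_bottom_borders; infer_instance

-- ===== CLAIM (what is proved, stated in full; the proofs are below) =====
def Claim_equal_top_bottom_borders : Prop := ∀ (top : Bool) (column_size : Int) (max_length : List Int), Dom_top_bottom_borders top column_size max_length → Pre_top_bottom_borders top column_size max_length → Spec_top_bottom_borders top column_size max_length (top_bottom_borders top column_size max_length)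

-- ===== LEMMAS AND PROOFS =====

-- join with a separator of a nonempty list, as head plus separator-prefixed tail
theorem pvJoin_cons (sep a : List Char) (l : List (List Char)) :
    PySem.Chars.join sep (a :: l) = a ++ l.flatMap (fun x => sep ++ x) := by
  induction l generalizing a with
  | nil => simp [PySem.Chars.join_singleton]
  | cons b l ih =>
      rw [PySem.Chars.join_cons_cons, ih]
      simp

-- A's loop over the middle columns (0 < j < cs-1) only ever takes the middle branch
theorem pvFold_mid (top : Bool) (cs : Int) (ml : List Int) (init : List Char)
    (a b : Int) (ha : 0 < a) (hb : b ≤ cs - 1) :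
    (PySem.List.pyRange a b).foldl (pvStepA top cs ml) init
      = init ++ (PySem.List.pyRange a b).flatMap
          (fun j => (if top then ['┬'] else ['┴']) ++ pvDashA (PySem.List.pyGetD ml j 0)) := by
  rw [PySem.List.foldl_congr_mem _ _
      (fun acc j => acc ++ ((if top then ['┬'] else ['┴']) ++ pvDashA (PySem.List.pyGetD ml j 0))) init ?_]
  · exact PySem.List.foldl_append_eq_flatMap _ _ _
  · intro acc j hj
    rw [PySem.List.mem_pyRange_one] at hj
    have hj0 : j ≠ 0 := by omega
    have hjl : j ≠ cs - 1 := by omega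
    cases top <;> simp [pvStepA, hj0, hjl]

theorem pv_equal (top : Bool) (cs : Int) (ml : List Int) :
    top_bottom_borders top cs ml = top_bottom_borders_alt top cs ml := by
  by_cases h0 : cs ≤ 0
  · have : PySem.List.pyRange 0 cs = [] := PySem.List.pyRange_one_eq_nil h0
    simp [top_bottom_borders, top_bottom_borders_alt, this, h0]
  · have h0' : ¬ cs ≤ 0 := h0
    by_cases h1 : cs = 1
    · subst h1
      have hr : PySem.List.pyRange 0 (1:Int) = [0] := by
        simpa using PySem.List.pyRange_one_singleton 0
      cases top <;>
        simp [top_bottom_borders, top_bottom_borders_alt, hr, pvStepA, pvSegsB,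
          PySem.Chars.join_singleton, pvDashA]
    · -- cs ≥ 2: split the range as [0] ++ middle ++ [cs-1]
      have hsplit : PySem.List.pyRange 0 cs
          = [0] ++ PySem.List.pyRange 1 (cs - 1) ++ [cs - 1] := by
        rw [PySem.List.pyRange_one_append 0 1 cs (by omega) (by omega)]
        rw [PySem.List.pyRange_one_append 1 (cs - 1) cs (by omega) (by omega)]
        have : PySem.List.pyRange 0 (1:Int) = [0] := by
          simpa using PySem.List.pyRange_one_singleton 0
        have hlast : PySem.List.pyRange (cs - 1) cs = [cs - 1] := by
          have := PySem.List.pyRange_one_singleton (cs - 1)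
          simpa [show cs - 1 + 1 = cs by ring] using this
        rw [this, hlast, List.append_assoc]
      have hlast : (cs - 1 : Int) ≠ 0 := by omega
      have hcs1 : cs ≠ 1 := h1
      -- A side
      have hA : (PySem.List.pyRange 0 cs).foldl (pvStepA top cs ml) []
          = pvStepA top cs ml
              (((PySem.List.pyRange 1 (cs - 1)).foldl (pvStepA top cs ml)
                 (pvStepA top cs ml [] 0))) (cs - 1) := by
        rw [hsplit]; simp [List.foldl_append]
      rw [top_bottom_borders, hA, pvFold_mid top cs ml _ 1 (cs - 1) (by omega) (by omega)]
      -- B side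
      have hsegs : pvSegsB cs ml
          = (PySem.List.pyRepeat ['─'] (PySem.List.pyGetD ml 0 0 + 2))
              :: (PySem.List.pyRange 1 cs).map
                  (fun j => PySem.List.pyRepeat ['─'] (PySem.List.pyGetD ml j 0 + 2)) := by
        rw [pvSegsB, PySem.List.pyRange_one_cons (by omega : (0:Int) < cs)]
        simp
      have hsegs2 : PySem.List.pyRange 1 cs
          = PySem.List.pyRange 1 (cs - 1) ++ [cs - 1] := by
        rw [PySem.List.pyRange_one_append 1 (cs - 1) cs (by omega) (by omega)]
        have := PySem.List.pyRange_one_singleton (cs - 1)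
        simpa [show cs - 1 + 1 = cs by ring] using this
      rw [top_bottom_borders_alt]
      have h02 : ¬ ((0:Int) = cs - 1) := by omega
      cases top <;>
        · simp only [if_neg h0', if_true, hsegs, hsegs2, pvJoin_cons]
          simp [pvStepA, hlast, hcs1, h02, pvDashA, List.flatMap_append, List.flatMap_map]

-- ===== VERDICT (by name: the statement is the Claim_ definition above) =====
theorem top_bottom_borders_spec : Claim_equal_top_bottom_borders := by
  intro top cs ml _ _
  unfold Spec_top_bottom_borders
  exact pv_equal top cs ml
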